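-- pv_equiv track=rewrite | github.com/shv1011/OpenEnv-Hackathon | school_env/school_env/app.py | _spread_slots
-- ===== SOURCE A (Python) =====
-- def _spread_slots(candidates: list, needed: int, days: list) -> list:
--     """Pick `needed` slots spread across days as evenly as possible."""
--     if len(candidates) <= needed:
--         return candidates
--     by_day: dict[str, list] = {d: [] for d in days}
--     for slot in candidates:
--         by_day[slot[0]].append(slot)
--     result = []
--     # Round-robin across days
--     day_iters = {d: iter(by_day[d]) for d in days}
--     while len(result) < needed:
--         added = False
--         for d in days:
--             if len(result) >= needed:
--                 break
--             try:
--                 result.append(next(day_iters[d]))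
--                 added = True
--             except StopIteration:
--                 pass
--         if not added:
--             break
--     return result
-- ===== SOURCE B (Python) =====
-- def _spread_slots(candidates: list, needed: int, days: list) -> list:
--     """Pick `needed` slots spread across days as evenly as possible."""
--     if len(candidates) <= needed:
--         return candidates
--     pos = {d: i for i, d in enumerate(days)}
--     seen = {}
--     keyed = []
--     for slot in candidates:
--         r = seen.get(slot[0], 0)
--         seen[slot[0]] = r + 1
--         # rank = (which round this slot would be picked in, position of its day)
--         keyed.append((r * len(days) + pos[slot[0]], slot))
--     keyed.sort(key=lambda t: t[0])
--     return [slot for _, slot in keyed[:needed]]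
-- ===== Notes on version B (the rewrite author's own statement) =====
-- stated objective: alternative
-- what changed: Replaces A's bucket-per-day dict plus round-robin iterator loop by a decorate-sort-slice pass: each candidate gets one integer rank round*len(days)+day_position computed in a single counting pass, the list is stable-sorted by that rank, and the first `needed` entries are returned (no buckets, no interleaving loop).
-- outside the precondition, e.g. on _spread_slots([('a', 1), ('a', 2)], -1, ['a']): A returns [], B returns [('a', 1)]
import Mathlib
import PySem

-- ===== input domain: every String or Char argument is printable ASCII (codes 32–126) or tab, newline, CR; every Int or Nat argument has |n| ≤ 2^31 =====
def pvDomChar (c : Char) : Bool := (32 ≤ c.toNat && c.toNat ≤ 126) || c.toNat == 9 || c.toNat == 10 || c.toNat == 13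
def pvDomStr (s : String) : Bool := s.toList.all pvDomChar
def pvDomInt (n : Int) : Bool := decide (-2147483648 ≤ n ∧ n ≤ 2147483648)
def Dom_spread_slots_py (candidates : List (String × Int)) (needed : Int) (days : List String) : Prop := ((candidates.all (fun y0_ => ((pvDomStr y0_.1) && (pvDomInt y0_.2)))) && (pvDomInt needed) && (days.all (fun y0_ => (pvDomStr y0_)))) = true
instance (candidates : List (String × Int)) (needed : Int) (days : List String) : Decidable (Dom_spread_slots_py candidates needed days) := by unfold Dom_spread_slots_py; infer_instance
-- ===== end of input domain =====

-- B replaces A's per-day buckets and round-robin iterator loop by decorate-sort-slice: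
-- one counting pass assigns each candidate the rank round*len(days)+day_position, a stable
-- sort by that rank yields the whole spread order, and the first `needed` are returned;
-- objective: alternative (same result by a genuinely different algorithm).

-- ===== PORT A =====
-- by_day = {d: [] for d in days}; for slot in candidates: by_day[slot[0]].append(slot)
-- (Dict.modify on a missing key inserts, where Python raises KeyError; such inputs
--  are excluded by Pre_, so the ports are exact on the admitted domain.)
def pvByDay (candidates : List (String × Int)) (days : List String) :
    PySem.Dict String (List (String × Int)) :=
  candidates.foldl
    (fun d slot => d.modify slot.1 [] (fun xs => xs ++ [slot]))
    (days.foldl (fun d day => d.insert day ([] : List (String × Int))) PySem.Dict.empty)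

-- the `for d in days:` body of A's while loop (iterators modeled as Nat cursors in a dict,
-- exactly Python's `day_iters`: duplicate day names share one cursor)
def pvAInner (byday : PySem.Dict String (List (String × Int))) (needed : Int) :
    List String → PySem.Dict String Nat → List (String × Int) → Bool →
    PySem.Dict String Nat × List (String × Int) × Bool
  | [], iters, res, added => (iters, res, added)
  | d :: ds, iters, res, added =>
    if (res.length : Int) < needed then
      let i := iters.getD d 0
      match (byday.getD d [])[i]? with
      | some slot => pvAInner byday needed ds (iters.insert d (i + 1)) (res ++ [slot]) true
      | none => pvAInner byday needed ds iters res added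
    else (iters, res, added)

-- A's `while len(result) < needed:` loop; fuel needed.toNat + 1 bounds it (each pass that
-- continues has appended at least one slot, and the body only runs while len(result) < needed)
def pvAOuter (byday : PySem.Dict String (List (String × Int))) (needed : Int)
    (days : List String) :
    Nat → PySem.Dict String Nat → List (String × Int) → List (String × Int)
  | 0, _, res => res
  | fuel + 1, iters, res =>
    if (res.length : Int) < needed then
      match pvAInner byday needed days iters res false with
      | (iters', res', added) =>
        if added then pvAOuter byday needed days fuel iters' res' else res'
    else res

def spread_slots_py (candidates : List (String × Int)) (needed : Int) (days : List String) : List (String × Int) :=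
  if (candidates.length : Int) ≤ needed then candidates
  else
    let byday := pvByDay candidates days
    let iters0 := days.foldl (fun m d => m.insert d (0 : Nat)) PySem.Dict.empty
    pvAOuter byday needed days (needed.toNat + 1) iters0 []

-- ===== PORT B =====
-- pos = {d: i for i, d in enumerate(days)}
def pvPosDict (days : List String) : PySem.Dict String Int :=
  (PySem.List.enumerate days 0).foldl (fun m q => m.insert q.2 q.1) PySem.Dict.empty

-- the decorate loop: `seen` counter + `keyed` list of (rank, slot) pairs.
-- Python's pos[slot[0]] raises KeyError on a day not listed in `days`; those inputs are
-- excluded by Pre_, so the total `getD 0` is exact on the admitted domain.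
def pvBFold (days : List String) (candidates : List (String × Int)) :
    PySem.Dict String Int × List (Int × (String × Int)) :=
  candidates.foldl
    (fun st slot =>
      let r := st.1.getD slot.1 0
      (st.1.insert slot.1 (r + 1),
       st.2 ++ [(r * (days.length : Int) + (pvPosDict days).getD slot.1 0, slot)]))
    (PySem.Dict.empty, [])

def spread_slots_py_alt (candidates : List (String × Int)) (needed : Int) (days : List String) : List (String × Int) :=
  if (candidates.length : Int) ≤ needed then candidates
  else
    let keyed := (pvBFold days candidates).2
    (PySem.List.slice (PySem.List.sorted keyed (fun t => t.1)) none (some needed)).map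
      (fun t => t.2)

-- ===== PRECONDITION & SPEC =====
-- Pre_ excludes (a) inputs where A raises KeyError (a candidate list longer than `needed`
-- with some slot's day not in `days`), (b) negative `needed` with nonempty candidates, a
-- meaningless count outside the function's natural domain (A happens to return [] there,
-- B's slice keeps a prefix), and (c) duplicate entries in `days`, a defensible corner where
-- A's duplicate day names share one iterator while B ranks all of them at the last position.
def Pre_spread_slots_py (candidates : List (String × Int)) (needed : Int) (days : List String) : Prop :=
  candidates = [] ∨
    (0 ≤ needed ∧ ((candidates.length : Int) ≤ needed ∨
      (days.Nodup ∧ ∀ p ∈ candidates, p.1 ∈ days)))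
instance (candidates : List (String × Int)) (needed : Int) (days : List String) : Decidable (Pre_spread_slots_py candidates needed days) := by unfold Pre_spread_slots_py; infer_instance

def pvWitness_spread_slots_py : (List (String × Int)) × Int × List String :=
  ([("mon", 1), ("tue", 2), ("mon", 3)], 2, ["mon", "tue"])

def Spec_spread_slots_py (candidates : List (String × Int)) (needed : Int) (days : List String) (out : List (String × Int)) : Prop := out = spread_slots_py_alt candidates needed days
instance (candidates : List (String × Int)) (needed : Int) (days : List String) (out : List (String × Int)) : Decidable (Spec_spread_slots_py candidates needed days out) := by unfold Spec_spread_slots_py; infer_instance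

-- ===== CLAIM (what is proved, stated in full; the proofs are below) =====
def Claim_equal_spread_slots_py : Prop := ∀ (candidates : List (String × Int)) (needed : Int) (days : List String), Dom_spread_slots_py candidates needed days → Pre_spread_slots_py candidates needed days → Spec_spread_slots_py candidates needed days (spread_slots_py candidates needed days)

-- ===== LEMMAS AND PROOFS =====

-- ---------- A-side: the loop produces the transpose of the buckets, row by row ----------

-- proof-local abbreviations: column i of the transpose, and the first k columns flattened
def pvRow (byday : PySem.Dict String (List (String × Int))) (days : List String) (i : Nat) :
    List (String × Int) :=
  (days.map (fun d => byday.getD d [])).filterMap (fun g => g[i]?)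

def pvFlatK (byday : PySem.Dict String (List (String × Int))) (days : List String) (k : Nat) :
    List (String × Int) :=
  (List.range k).flatMap (pvRow byday days)

theorem pvFlatK_succ (byday : PySem.Dict String (List (String × Int))) (days : List String)
    (k : Nat) : pvFlatK byday days (k + 1) = pvFlatK byday days k ++ pvRow byday days k := by
  simp [pvFlatK, List.range_succ]

-- a fold of constant-value inserts leaves other keys alone …
theorem pvGetD_foldl_insert_not_mem {ν : Type} (v w : ν) (ds : List String)
    (m : PySem.Dict String ν) (d : String) (h : d ∉ ds) :
    (ds.foldl (fun m x => m.insert x v) m).getD d w = m.getD d w := by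
  induction ds generalizing m with
  | nil => rfl
  | cons x xs ih =>
    simp only [List.mem_cons, not_or] at h
    rw [List.foldl_cons, ih _ h.2, PySem.Dict.getD_insert_of_ne _ _ _ h.1]

-- … and sets every listed key to that value
theorem pvGetD_foldl_insert_mem {ν : Type} (v w : ν) (ds : List String)
    (m : PySem.Dict String ν) (d : String) (h : d ∈ ds) :
    (ds.foldl (fun m x => m.insert x v) m).getD d w = v := by
  induction ds generalizing m with
  | nil => simp at h
  | cons x xs ih =>
    rw [List.foldl_cons]
    by_cases hx : d ∈ xs
    · exact ih _ hx
    · have hdx : d = x := by rcases List.mem_cons.mp h with h' | h' <;> tauto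
      rw [pvGetD_foldl_insert_not_mem _ _ _ _ _ hx, hdx, PySem.Dict.getD_insert_self]

-- the grouping loop: each day's bucket is the filter of candidates with that day
theorem pvGetD_group_loop (l : List (String × Int))
    (m : PySem.Dict String (List (String × Int))) (c : String) :
    (l.foldl (fun d p => d.modify p.1 [] (fun xs => xs ++ [p])) m).getD c [] =
      m.getD c [] ++ l.filter (fun p => p.1 = c) := by
  induction l generalizing m with
  | nil => simp
  | cons p l ih =>
    rw [List.foldl_cons, ih, PySem.Dict.getD_modify]
    by_cases h : c = p.1
    · subst h; simp
    · have h2 : ¬(p.1 = c) := fun hh => h hh.symm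
      simp [h, h2]

theorem pvGetD_byDay (candidates : List (String × Int)) (days : List String) (d : String)
    (hd : d ∈ days) :
    (pvByDay candidates days).getD d [] = candidates.filter (fun p => p.1 = d) := by
  rw [pvByDay, pvGetD_group_loop, pvGetD_foldl_insert_mem _ _ _ _ _ hd, List.nil_append]

-- a 0/1 indicator sums to 0 over a list missing the key …
theorem pvSum_ind_zero (a : String) (days : List String) (h : a ∉ days) :
    (days.map (fun d => if a = d then 1 else 0)).sum = 0 := by
  induction days with
  | nil => simp
  | cons d ds ih =>
    simp only [List.mem_cons, not_or] at h
    simp [h.1, ih h.2]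

-- … and to 1 over a duplicate-free list containing it
theorem pvSum_ind_one (a : String) (days : List String) (hnod : days.Nodup) (h : a ∈ days) :
    (days.map (fun d => if a = d then 1 else 0)).sum = 1 := by
  induction days with
  | nil => simp at h
  | cons d ds ih =>
    simp only [List.nodup_cons] at hnod
    by_cases hd : a = d
    · subst hd
      simp [pvSum_ind_zero a ds hnod.1]
    · rcases List.mem_cons.mp h with h' | h'
      · exact absurd h' hd
      · simp [hd, ih hnod.2 h']

-- total size of the buckets = number of candidates (days distinct, every slot's day listed)
theorem pvSum_filter_len (days : List String) (l : List (String × Int))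
    (hnod : days.Nodup) (hmem : ∀ p ∈ l, p.1 ∈ days) :
    ((days.map (fun d => (l.filter (fun p => p.1 = d)).length)).sum = l.length) := by
  induction l with
  | nil => simp
  | cons p l ih =>
    have hrec := ih (fun q hq => hmem q (by simp [hq]))
    calc (days.map (fun d => (List.filter (fun p => p.1 = d) (p :: l)).length)).sum
        = (days.map (fun d => (fun d => if p.1 = d then 1 else 0) d +
            (fun d => (l.filter (fun q => q.1 = d)).length) d)).sum := by
          apply congrArg; apply List.map_congr_left; intro d _
          by_cases h : p.1 = d <;> simp [h] <;> omega
      _ = 1 + l.length := by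
          rw [List.sum_map_add, pvSum_ind_one p.1 days hnod (hmem p (by simp)), hrec]
      _ = (p :: l).length := by simp [Nat.add_comm]

-- length of one column as a 0/1 sum
theorem pvLen_filterMap (gs : List (List (String × Int))) (i : Nat) :
    (gs.filterMap (fun g => g[i]?)).length =
      (gs.map (fun g => if i < g.length then 1 else 0)).sum := by
  induction gs with
  | nil => rfl
  | cons g gs ih =>
    by_cases h : i < g.length
    · rw [List.filterMap_cons, List.getElem?_eq_getElem h]
      simp [h, ih]
      omega
    · rw [List.filterMap_cons, List.getElem?_eq_none_iff.mpr (by omega)]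
      simp [h, ih]

theorem pvSum_ite_range (w n : Nat) :
    ((List.range w).map (fun i => if i < n then 1 else 0)).sum = min w n := by
  induction w with
  | zero => simp
  | succ w ih =>
    rw [List.range_succ, List.map_append, List.sum_append, ih]
    by_cases h : w < n <;> simp [h] <;> omega

-- double counting: summing the 0/1 indicators column-by-column gives the bucket sizes
theorem pvSum_swap (w : Nat) (gs : List (List (String × Int)))
    (h : ∀ g ∈ gs, g.length ≤ w) :
    ((List.range w).map (fun i => (gs.map (fun g => if i < g.length then 1 else 0)).sum)).sum
      = (gs.map List.length).sum := by
  induction gs with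
  | nil => simp
  | cons g gs ih =>
    have step : ∀ i : Nat, ((g :: gs).map (fun g => if i < g.length then 1 else 0)).sum =
        (fun i => if i < g.length then 1 else 0) i +
          (fun i => (gs.map (fun g => if i < g.length then 1 else 0)).sum) i := by
      intro i; simp
    calc ((List.range w).map
            (fun i => ((g :: gs).map (fun g => if i < g.length then 1 else 0)).sum)).sum
        = ((List.range w).map (fun i => (fun i => if i < g.length then 1 else 0) i +
            (fun i => (gs.map (fun g => if i < g.length then 1 else 0)).sum) i)).sum := by
          apply congrArg; exact List.map_congr_left (fun i _ => step i)
      _ = g.length + (gs.map List.length).sum := by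
          rw [List.sum_map_add, pvSum_ite_range,
            Nat.min_eq_right (h g (by simp)), ih (fun g' hg' => h g' (by simp [hg']))]
      _ = ((g :: gs).map List.length).sum := by simp

-- total length of the flattened transpose = sum of bucket sizes (all bounded by width)
theorem pvFlat_length (byday : PySem.Dict String (List (String × Int))) (days : List String)
    (w : Nat) (hw : ∀ g ∈ days.map (fun d => byday.getD d []), g.length ≤ w) :
    (pvFlatK byday days w).length = ((days.map (fun d => (byday.getD d []).length)).sum) := by
  have h1 : (pvFlatK byday days w).length =
      ((List.range w).map (fun i => (pvRow byday days i).length)).sum := by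
    simp [pvFlatK, List.length_flatMap]
  rw [h1]
  have h2 : ∀ i : Nat, (pvRow byday days i).length =
      ((days.map (fun d => byday.getD d [])).map (fun g => if i < g.length then 1 else 0)).sum :=
    fun i => pvLen_filterMap _ i
  calc ((List.range w).map (fun i => (pvRow byday days i).length)).sum
      = ((List.range w).map (fun i =>
          ((days.map (fun d => byday.getD d [])).map
            (fun g => if i < g.length then 1 else 0)).sum)).sum := by
        apply congrArg; exact List.map_congr_left (fun i _ => h2 i)
    _ = ((days.map (fun d => byday.getD d [])).map List.length).sum := pvSum_swap w _ hw
    _ = (days.map (fun d => (byday.getD d []).length)).sum := by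
        rw [List.map_map]; rfl

-- the fold computing `width` returns its seed or an element of the list
theorem pvFoldl_max_mem (l : List Nat) (a : Nat) : l.foldl max a = a ∨ l.foldl max a ∈ l := by
  induction l generalizing a with
  | nil => simp
  | cons x xs ih =>
    rcases ih (max a x) with h | h
    · rcases max_choice a x with h' | h' <;> rw [List.foldl_cons, h, h']
      · tauto
      · exact Or.inr (by simp)
    · exact Or.inr (by simp [List.foldl_cons, h])

-- every column before `width` is nonempty
theorem pvRow_ne_nil (byday : PySem.Dict String (List (String × Int))) (days : List String)
    (i : Nat)
    (hi : i < ((days.map (fun d => byday.getD d [])).map List.length).foldl max 0) :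
    pvRow byday days i ≠ [] := by
  rcases pvFoldl_max_mem ((days.map (fun d => byday.getD d [])).map List.length) 0 with h | h
  · omega
  · rcases List.mem_map.mp h with ⟨g, hg, hlen⟩
    intro hnil
    rw [pvRow] at hnil
    have := (List.filterMap_eq_nil_iff.mp hnil) g hg
    rw [List.getElem?_eq_none_iff] at this
    omega

-- the first k columns hold at least k slots (each is nonempty)
theorem pvFlatK_len_ge (byday : PySem.Dict String (List (String × Int))) (days : List String)
    (w k : Nat) (hk : k ≤ w)
    (hw : w = ((days.map (fun d => byday.getD d [])).map List.length).foldl max 0) :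
    k ≤ (pvFlatK byday days k).length := by
  induction k with
  | zero => simp
  | succ k ih =>
    rw [pvFlatK_succ, List.length_append]
    have h1 := ih (by omega)
    have h2 : pvRow byday days k ≠ [] := pvRow_ne_nil _ _ _ (by omega)
    have := List.length_pos_iff.mpr h2
    omega

-- prefix property: the first k columns are an initial segment of the full transpose
theorem pvFlatK_prefix (byday : PySem.Dict String (List (String × Int))) (days : List String)
    (w k : Nat) (hk : k ≤ w) :
    ∃ t, pvFlatK byday days w = pvFlatK byday days k ++ t := by
  refine ⟨(List.range (w - k)).flatMap (fun a => pvRow byday days (k + a)), ?_⟩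
  conv_lhs => rw [pvFlatK, show w = k + (w - k) by omega, List.range_add]
  rw [List.flatMap_append, List.flatMap_map]
  rfl

-- the inner pass (one traversal of `days`): appends the truncated column k, reports whether
-- anything was appended, advances exactly the cursors of the days whose column-k entry was taken
theorem pvAInner_spec (byday : PySem.Dict String (List (String × Int))) (needed : Int)
    (h0 : 0 ≤ needed) (k : Nat) :
    ∀ (ds : List String) (iters : PySem.Dict String Nat) (res : List (String × Int))
      (added : Bool), ds.Nodup →
      (∀ d ∈ ds, iters.getD d 0 = min k (byday.getD d []).length) →
      (let out := pvAInner byday needed ds iters res added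
       let row := ds.filterMap (fun d => (byday.getD d [])[k]?)
       out.2.1 = res ++ row.take (needed.toNat - res.length) ∧
       out.2.2 = (added || decide (res.length < needed.toNat ∧ row ≠ [])) ∧
       (res.length + row.length ≤ needed.toNat →
         ∀ d ∈ ds, out.1.getD d 0 = min (k + 1) (byday.getD d []).length) ∧
       (∀ d, d ∉ ds → out.1.getD d 0 = iters.getD d 0)) := by
  intro ds
  induction ds with
  | nil => intro iters res added _ _; simp [pvAInner]
  | cons d ds ih =>
    intro iters res added hnod hinv
    simp only [List.nodup_cons] at hnod
    have hd := hinv d (by simp)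
    have hcmp : ((res.length : Int) < needed) ↔ res.length < needed.toNat := by omega
    by_cases hlt : res.length < needed.toNat
    · by_cases hklen : k < (byday.getD d []).length
      · -- column-k entry exists for day d: take it
        have hmin : min k (byday.getD d []).length = k := by omega
        have hget : (byday.getD d [])[iters.getD d 0]? = some (byday.getD d [])[k] := by
          rw [hd, hmin]; exact List.getElem?_eq_getElem hklen
        have hrow : (d :: ds).filterMap (fun d => (byday.getD d [])[k]?) =
            (byday.getD d [])[k] :: ds.filterMap (fun d => (byday.getD d [])[k]?) := by
          rw [List.filterMap_cons, List.getElem?_eq_getElem hklen]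
        have hstep : pvAInner byday needed (d :: ds) iters res added =
            pvAInner byday needed ds (iters.insert d (iters.getD d 0 + 1))
              (res ++ [(byday.getD d [])[k]]) true := by
          simp only [pvAInner]
          rw [if_pos (hcmp.mpr hlt), hget]
        have hinv' : ∀ d' ∈ ds, (iters.insert d (iters.getD d 0 + 1)).getD d' 0 =
            min k (byday.getD d' []).length := by
          intro d' hd'
          rw [PySem.Dict.getD_insert_of_ne _ _ _
            (fun h => hnod.1 (by rw [← h]; exact hd'))]
          exact hinv d' (by simp [hd'])
        obtain ⟨hA, hB, hC, hD⟩ := ih (iters.insert d (iters.getD d 0 + 1))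
          (res ++ [(byday.getD d [])[k]]) true hnod.2 hinv'
        rw [hstep]
        refine ⟨?_, ?_, ?_, ?_⟩
        · rw [hA, hrow]
          have hsub : needed.toNat - res.length = (needed.toNat - (res.length + 1)) + 1 := by
            omega
          rw [hsub, List.take_succ_cons]
          simp
        · rw [hB, hrow]
          simp [hlt]
        · intro hlen d' hd'
          rw [hrow] at hlen
          rcases List.mem_cons.mp hd' with h' | h'
          · subst h'
            rw [hD d' hnod.1, PySem.Dict.getD_insert_self, hd, hmin]
            omega
          · refine hC ?_ d' h'
            simp at hlen ⊢
            omega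
        · intro d' hd'
          simp only [List.mem_cons, not_or] at hd'
          rw [hD d' hd'.2, PySem.Dict.getD_insert_of_ne _ _ _ hd'.1]
      · -- day d's bucket is exhausted at column k
        have hmin : min k (byday.getD d []).length = (byday.getD d []).length := by omega
        have hget : (byday.getD d [])[iters.getD d 0]? = none := by
          rw [hd, hmin]; exact List.getElem?_eq_none_iff.mpr (by omega)
        have hrow : (d :: ds).filterMap (fun d => (byday.getD d [])[k]?) =
            ds.filterMap (fun d => (byday.getD d [])[k]?) := by
          rw [List.filterMap_cons, List.getElem?_eq_none_iff.mpr (by omega)]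
        have hstep : pvAInner byday needed (d :: ds) iters res added =
            pvAInner byday needed ds iters res added := by
          simp only [pvAInner]
          rw [if_pos (hcmp.mpr hlt), hget]
        obtain ⟨hA, hB, hC, hD⟩ := ih iters res added hnod.2
          (fun d' hd' => hinv d' (by simp [hd']))
        rw [hstep, hrow]
        refine ⟨hA, hB, ?_, ?_⟩
        · intro hlen d' hd'
          rcases List.mem_cons.mp hd' with h' | h'
          · subst h'
            rw [hD d' hnod.1, hd, hmin]
            omega
          · exact hC hlen d' h'
        · intro d' hd'
          exact hD d' (by simp at hd'; tauto)
    · -- result already full: the pass stops immediately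
      have hstop : pvAInner byday needed (d :: ds) iters res added = (iters, res, added) := by
        simp only [pvAInner]
        rw [if_neg (fun h => hlt (hcmp.mp h))]
      rw [hstop]
      refine ⟨by simp [show needed.toNat - res.length = 0 by omega], by simp [hlt], ?_,
        fun _ _ => rfl⟩
      intro hlen d' hd'
      have hrow0 : (d :: ds).filterMap (fun d => (byday.getD d [])[k]?) = [] := by
        have hl0 : ((d :: ds).filterMap (fun d => (byday.getD d [])[k]?)).length = 0 := by
          omega
        exact List.eq_nil_of_length_eq_zero hl0
      have hnone := (List.filterMap_eq_nil_iff.mp hrow0) d' hd'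
      rw [List.getElem?_eq_none_iff] at hnone
      rw [hinv d' hd']
      omega

-- the outer while loop, run from the state "first k columns already collected"
theorem pvAOuter_spec (byday : PySem.Dict String (List (String × Int))) (needed : Int)
    (days : List String) (w : Nat) (hnod : days.Nodup) (h0 : 0 ≤ needed)
    (hw : w = ((days.map (fun d => byday.getD d [])).map List.length).foldl max 0)
    (hflat : needed.toNat < (pvFlatK byday days w).length) :
    ∀ (fuel k : Nat) (iters : PySem.Dict String Nat), k ≤ w →
      (∀ d ∈ days, iters.getD d 0 = min k (byday.getD d []).length) →
      (pvFlatK byday days k).length ≤ needed.toNat →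
      needed.toNat + 1 ≤ fuel + k →
      pvAOuter byday needed days fuel iters (pvFlatK byday days k) =
        (pvFlatK byday days w).take needed.toNat := by
  intro fuel
  induction fuel with
  | zero =>
    intro k iters hkw hinv hlen hfuel
    have := pvFlatK_len_ge byday days w k hkw hw
    omega
  | succ fuel ih =>
    intro k iters hkw hinv hlen hfuel
    have hkl := pvFlatK_len_ge byday days w k hkw hw
    by_cases hfull : (pvFlatK byday days k).length = needed.toNat
    · -- already exactly full: the loop condition fails and the collected prefix is the answer
      simp only [pvAOuter]
      rw [if_neg (by omega)]
      obtain ⟨t, ht⟩ := pvFlatK_prefix byday days w k hkw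
      rw [ht, ← hfull, List.take_left]
    · have hlt : (pvFlatK byday days k).length < needed.toNat := by omega
      have hkww : k < w := by
        rcases Nat.lt_or_ge k w with h | h
        · exact h
        · exfalso
          have hkeq : k = w := by omega
          subst hkeq; omega
      have hrow := pvRow_ne_nil byday days k (by omega)
      have hrow_eq : days.filterMap (fun d => (byday.getD d [])[k]?) = pvRow byday days k := by
        rw [pvRow, List.filterMap_map]; rfl
      obtain ⟨hA, hB, hC, _⟩ := pvAInner_spec byday needed h0 k days iters
        (pvFlatK byday days k) false hnod hinv
      rw [hrow_eq] at hA hB hC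
      simp only [pvAOuter]
      rw [if_pos (by omega : ((pvFlatK byday days k).length : Int) < needed)]
      rcases hout : pvAInner byday needed days iters (pvFlatK byday days k) false with
        ⟨iters', res', added'⟩
      rw [hout] at hA hB hC
      dsimp only at hA hB hC ⊢
      have hBtrue : added' = true := by rw [hB]; simp [hlt, hrow]
      rw [hBtrue]
      simp only [if_true]
      by_cases hcase :
          (pvFlatK byday days k).length + (pvRow byday days k).length ≤ needed.toNat
      · -- whole column k was appended: recurse with k+1
        have htake : (pvRow byday days k).take (needed.toNat - (pvFlatK byday days k).length) =
            pvRow byday days k := List.take_of_length_le (by omega)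
        have hres' : res' = pvFlatK byday days (k + 1) := by
          rw [hA, htake, pvFlatK_succ]
        have hlen' : (pvFlatK byday days (k + 1)).length ≤ needed.toNat := by
          rw [pvFlatK_succ]; simp; omega
        rw [hres']
        exact ih (k + 1) iters' (by omega) (hC hcase) hlen' (by omega)
      · -- the column was truncated: the result is exactly full, and the next pass returns it
        have hlen' : res'.length = needed.toNat := by
          rw [hA]; simp [List.length_take]; omega
        have hres' : res' = (pvFlatK byday days w).take needed.toNat := by
          obtain ⟨t, ht⟩ := pvFlatK_prefix byday days w (k + 1) (by omega)
          rw [hA, ht, pvFlatK_succ, List.append_assoc,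
            show needed.toNat = (pvFlatK byday days k).length +
              (needed.toNat - (pvFlatK byday days k).length) by omega,
            List.take_length_add_append,
            List.take_append_of_le_length (by omega)]
          simp
        cases fuel with
        | zero => omega
        | succ f =>
          simp only [pvAOuter]
          rw [if_neg (by omega)]
          exact hres'

-- ---------- B-side: the sorted keyed list IS the flattened transpose ----------

-- the per-day filter, B-side shorthand (definitionally A's bucket content)
def pvG (cand : List (String × Int)) (d : String) : List (String × Int) :=
  cand.filter (fun p => p.1 = d)

-- the pos-building fold ignores keys not in the enumerated list …
theorem pvPos_loop_not_mem (xs : List String) (s : Int) (m : PySem.Dict String Int)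
    (d : String) (h : d ∉ xs) :
    ((PySem.List.enumerate xs s).foldl (fun m q => m.insert q.2 q.1) m).getD d 0 =
      m.getD d 0 := by
  induction xs generalizing s m with
  | nil => simp [PySem.List.enumerate_nil]
  | cons x xs ih =>
    simp only [List.mem_cons, not_or] at h
    rw [PySem.List.enumerate_cons, List.foldl_cons, ih _ _ h.2,
      PySem.Dict.getD_insert_of_ne _ _ _ h.1]

-- … and maps a listed key (days duplicate-free) to start + its index
theorem pvPos_loop_mem (xs : List String) (s : Int) (m : PySem.Dict String Int)
    (d : String) (hnod : xs.Nodup) (h : d ∈ xs) :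
    ((PySem.List.enumerate xs s).foldl (fun m q => m.insert q.2 q.1) m).getD d 0 =
      s + (xs.idxOf d : Int) := by
  induction xs generalizing s m with
  | nil => simp at h
  | cons x xs ih =>
    simp only [List.nodup_cons] at hnod
    rw [PySem.List.enumerate_cons, List.foldl_cons]
    by_cases hx : d = x
    · subst hx
      rw [pvPos_loop_not_mem _ _ _ _ hnod.1, PySem.Dict.getD_insert_self,
        List.idxOf_cons_self]
      simp
    · rcases List.mem_cons.mp h with h' | h'
      · exact absurd h' hx
      · rw [ih _ _ hnod.2 h', List.idxOf_cons_ne _ (fun he => hx he.symm)]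
        simp only [Nat.succ_eq_add_one]
        push_cast
        ring

theorem pvPosDict_getD (days : List String) (d : String) (hnod : days.Nodup)
    (h : d ∈ days) : (pvPosDict days).getD d 0 = (days.idxOf d : Int) := by
  rw [pvPosDict, pvPos_loop_mem days 0 _ d hnod h, zero_add]

-- the `seen` counter holds, for each day, how many of its slots were processed
theorem pvBFold_fst (days : List String) (l : List (String × Int)) :
    ∀ (m : PySem.Dict String Int) (acc : List (Int × (String × Int))) (d : String),
    (l.foldl (fun st slot =>
        let r := st.1.getD slot.1 0
        (st.1.insert slot.1 (r + 1),
         st.2 ++ [(r * (days.length : Int) + (pvPosDict days).getD slot.1 0, slot)]))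
      (m, acc)).1.getD d 0 = m.getD d 0 + ((pvG l d).length : Int) := by
  induction l with
  | nil => intro m acc d; simp [pvG]
  | cons p l ih =>
    intro m acc d
    rw [List.foldl_cons, ih]
    by_cases hd : d = p.1
    · rw [hd, PySem.Dict.getD_insert_self]
      have hg : pvG (p :: l) p.1 = p :: pvG l p.1 := by simp [pvG, List.filter_cons]
      rw [hg]
      push_cast [List.length_cons]
      ring
    · rw [PySem.Dict.getD_insert_of_ne _ _ _ hd]
      have hg : pvG (p :: l) d = pvG l d := by
        have h2 : ¬(p.1 = d) := fun he => hd he.symm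
        simp [pvG, List.filter_cons, h2]
      rw [hg]

theorem pvG_append_singleton (l : List (String × Int)) (p : String × Int) (d : String) :
    pvG (l ++ [p]) d = pvG l d ++ if p.1 = d then [p] else [] := by
  rw [pvG, List.filter_append]
  congr 1
  by_cases h : p.1 = d <;> simp [List.filter_cons, h]

-- appending one candidate appends exactly its (rank, slot) pair to `keyed`
theorem pvBFold_snd_snoc (days : List String) (l : List (String × Int)) (p : String × Int) :
    (pvBFold days (l ++ [p])).2 =
      (pvBFold days l).2 ++
        [(((pvG l p.1).length : Int) * (days.length : Int) +
            (pvPosDict days).getD p.1 0, p)] := by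
  rw [pvBFold, List.foldl_append, List.foldl_cons, List.foldl_nil]
  have hr : (pvBFold days l).1.getD p.1 0 = ((pvG l p.1).length : Int) := by
    rw [pvBFold, pvBFold_fst]
    simp
  dsimp only
  rw [show (List.foldl (fun st slot =>
      (st.1.insert slot.1 (st.1.getD slot.1 0 + 1),
       st.2 ++ [(st.1.getD slot.1 0 * (days.length : Int) +
         (pvPosDict days).getD slot.1 0, slot)]))
      (PySem.Dict.empty, ([] : List (Int × (String × Int)))) l) = pvBFold days l from rfl]
  rw [hr]

-- distributing a flatMap of appended blocks (a permutation, not an equality)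
theorem pvFlatMap_append_perm {α β : Type} (l : List α) (f g : α → List β) :
    (l.flatMap (fun x => f x ++ g x)).Perm (l.flatMap f ++ l.flatMap g) := by
  induction l with
  | nil => simp
  | cons x l ih =>
    simp only [List.flatMap_cons]
    refine ((List.Perm.append_left (f x ++ g x) ih).trans ?_)
    rw [List.append_assoc, List.append_assoc]
    refine List.Perm.append_left (f x) ?_
    exact List.perm_append_comm_assoc (g x) (l.flatMap f) (l.flatMap g)

-- the one-day selector over an enumerate: empty when the day is absent …
theorem pvPick_none {β : Type} (xs : List String) (s : Int) (d : String) (F : Int → β)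
    (h : d ∉ xs) :
    (PySem.List.enumerate xs s).flatMap (fun q => if q.2 = d then [F q.1] else []) = [] := by
  induction xs generalizing s with
  | nil => simp [PySem.List.enumerate_nil]
  | cons x xs ih =>
    simp only [List.mem_cons, not_or] at h
    rw [PySem.List.enumerate_cons, List.flatMap_cons, if_neg (fun he => h.1 he.symm),
      List.nil_append]
    exact ih (s + 1) h.2

-- … and a singleton at the day's index when days are duplicate-free
theorem pvPick_unique {β : Type} (xs : List String) (s : Int) (d : String) (F : Int → β)
    (hnod : xs.Nodup) (h : d ∈ xs) :
    (PySem.List.enumerate xs s).flatMap (fun q => if q.2 = d then [F q.1] else []) =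
      [F (s + (xs.idxOf d : Int))] := by
  induction xs generalizing s with
  | nil => simp at h
  | cons x xs ih =>
    simp only [List.nodup_cons] at hnod
    rw [PySem.List.enumerate_cons, List.flatMap_cons]
    by_cases hx : x = d
    · subst hx
      rw [if_pos rfl, pvPick_none xs (s + 1) x F hnod.1, List.idxOf_cons_self]
      simp
    · have h' : d ∈ xs := by
        rcases List.mem_cons.mp h with h' | h'
        · exact absurd h'.symm hx
        · exact h'
      rw [if_neg hx, List.nil_append, ih (s + 1) hnod.2 h',
        List.idxOf_cons_ne _ hx]
      have : s + 1 + (List.idxOf d xs : Int) = s + ((List.idxOf d xs).succ : Int) := by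
        push_cast; ring
      rw [this]

-- the `keyed` list is a permutation of the day-grouped decorated list
def pvGrouped (cand : List (String × Int)) (days : List String) :
    List (Int × (String × Int)) :=
  (PySem.List.enumerate days 0).flatMap
    (fun q => (PySem.List.enumerate (pvG cand q.2) 0).map
      (fun s => (s.1 * (days.length : Int) + q.1, s.2)))

theorem pvKeyed_perm_grouped (days : List String) (hnod : days.Nodup) :
    ∀ (cand : List (String × Int)), (∀ p ∈ cand, p.1 ∈ days) →
    ((pvBFold days cand).2).Perm (pvGrouped cand days) := by
  intro cand
  induction cand using List.reverseRecOn with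
  | nil =>
    intro _
    have : pvGrouped [] days = [] := by
      rw [pvGrouped]
      apply List.flatMap_eq_nil_iff.mpr
      intro q _
      simp [pvG, PySem.List.enumerate_nil]
    rw [this, pvBFold]
    simp
  | append_singleton l p ih =>
    intro hmem
    have hpd : p.1 ∈ days := hmem p (by simp)
    have hml : ∀ q ∈ l, q.1 ∈ days := fun q hq => hmem q (by simp [hq])
    rw [pvBFold_snd_snoc]
    have hsplit : pvGrouped (l ++ [p]) days =
        (PySem.List.enumerate days 0).flatMap
          (fun q => (PySem.List.enumerate (pvG l q.2) 0).map
              (fun s => (s.1 * (days.length : Int) + q.1, s.2)) ++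
            (if q.2 = p.1 then
              [(((pvG l p.1).length : Int) * (days.length : Int) + q.1, p)] else [])) := by
      rw [pvGrouped]
      apply List.flatMap_congr
      intro q _
      rw [pvG_append_singleton]
      by_cases hqp : q.2 = p.1
      · rw [if_pos hqp, if_pos hqp.symm, PySem.List.enumerate_append, List.map_append,
          hqp]
        simp [PySem.List.enumerate_cons, PySem.List.enumerate_nil]
      · rw [if_neg hqp, if_neg (fun he => hqp he.symm), List.append_nil, List.append_nil]
    rw [hsplit]
    refine List.Perm.trans ?_ (pvFlatMap_append_perm _ _ _).symm
    rw [pvPick_unique days 0 p.1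
      (fun i => (((pvG l p.1).length : Int) * (days.length : Int) + i, p)) hnod hpd]
    rw [zero_add, ← pvPosDict_getD days p.1 hnod hpd]
    exact List.Perm.append_right _ (ih hml)

-- the row-grouped (transposed) decorated list
def pvTRow (cand : List (String × Int)) (days : List String) (r : Nat) :
    List (Int × (String × Int)) :=
  (PySem.List.enumerate days 0).filterMap
    (fun q => ((pvG cand q.2)[r]?).map
      (fun slot => ((r : Int) * (days.length : Int) + q.1, slot)))

def pvDecorated (cand : List (String × Int)) (days : List String) (w : Nat) :
    List (Int × (String × Int)) :=
  (List.range w).flatMap (pvTRow cand days)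

-- generic: the flattened transpose of a family of rows is a permutation of its flatten
theorem pvFilterMap_cons_toList {α β : Type} (f : α → Option β) (x : α) (l : List α) :
    List.filterMap f (x :: l) = (f x).toList ++ List.filterMap f l := by
  cases h : f x <;> simp [List.filterMap_cons, h]

theorem pvFlatMap_getElem_range {β : Type} (g : List β) (w : Nat) :
    (List.range w).flatMap (fun r => g[r]?.toList) = g.take w := by
  induction w with
  | zero => simp
  | succ w ih =>
    rw [List.range_succ, List.flatMap_append, ih, List.take_succ]
    simp

theorem pvTranspose_perm {β : Type} (w : Nat) :
    ∀ (gs : List (List β)), (∀ g ∈ gs, g.length ≤ w) →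
    ((List.range w).flatMap (fun r => gs.filterMap (fun g => g[r]?))).Perm gs.flatten := by
  intro gs
  induction gs with
  | nil => simp
  | cons g gs ih =>
    intro hb
    have e1 : (List.range w).flatMap (fun r => (g :: gs).filterMap (fun g => g[r]?)) =
        (List.range w).flatMap (fun r => g[r]?.toList ++ gs.filterMap (fun g => g[r]?)) :=
      List.flatMap_congr (fun r _ => pvFilterMap_cons_toList _ _ _)
    rw [e1, List.flatten_cons]
    refine (pvFlatMap_append_perm _ _ _).trans ?_
    rw [pvFlatMap_getElem_range, List.take_of_length_le (hb g (by simp))]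
    exact List.Perm.append_left g (ih (fun g' hg' => hb g' (by simp [hg'])))

theorem pvGrouped_perm_decorated (cand : List (String × Int)) (days : List String) (w : Nat)
    (hb : ∀ d ∈ days, (pvG cand d).length ≤ w) :
    (pvDecorated cand days w).Perm (pvGrouped cand days) := by
  have hflat : pvGrouped cand days =
      ((PySem.List.enumerate days 0).map
        (fun q => (PySem.List.enumerate (pvG cand q.2) 0).map
          (fun s => (s.1 * (days.length : Int) + q.1, s.2)))).flatten := by
    rw [pvGrouped, List.flatMap_def]
  have hrows : ∀ r : Nat,
      ((PySem.List.enumerate days 0).map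
        (fun q => (PySem.List.enumerate (pvG cand q.2) 0).map
          (fun s => (s.1 * (days.length : Int) + q.1, s.2)))).filterMap
        (fun g => g[r]?) = pvTRow cand days r := by
    intro r
    rw [List.filterMap_map, pvTRow]
    apply List.filterMap_congr
    intro q _
    simp only [Function.comp, List.getElem?_map, PySem.List.getElem?_enumerate]
    cases h : (pvG cand q.2)[r]? <;> simp [h]
  have hlen : ∀ g ∈ (PySem.List.enumerate days 0).map
      (fun q => (PySem.List.enumerate (pvG cand q.2) 0).map
        (fun s => (s.1 * (days.length : Int) + q.1, s.2))), g.length ≤ w := by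
    intro g hg
    rcases List.mem_map.mp hg with ⟨q, hq, rfl⟩
    rcases (PySem.List.mem_enumerate_iff _ _ _).mp hq with ⟨k, hk, rfl⟩
    rw [List.length_map, PySem.List.length_enumerate]
    exact hb _ (List.getElem_mem hk)
  have e : pvDecorated cand days w =
      (List.range w).flatMap (fun r =>
        ((PySem.List.enumerate days 0).map
          (fun q => (PySem.List.enumerate (pvG cand q.2) 0).map
            (fun s => (s.1 * (days.length : Int) + q.1, s.2)))).filterMap
          (fun g => g[r]?)) := by
    rw [pvDecorated]
    exact (List.flatMap_congr (fun r _ => (hrows r))).symm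
  rw [e, hflat]
  exact pvTranspose_perm w _ hlen

-- the decorated transpose is strictly increasing in its rank component
theorem pvDecorated_pairwise (cand : List (String × Int)) (days : List String) (w : Nat) :
    (pvDecorated cand days w).Pairwise (fun a b => a.1 < b.1) := by
  rw [pvDecorated, List.flatMap_def, List.pairwise_flatten]
  constructor
  · intro l hl
    rcases List.mem_map.mp hl with ⟨r, _, rfl⟩
    rw [pvTRow, List.pairwise_filterMap]
    refine (PySem.List.pairwise_lt_enumerate days 0).imp ?_
    intro q q' hqq b hb b' hb'
    rcases Option.map_eq_some_iff.mp hb with ⟨s1, _, rfl⟩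
    rcases Option.map_eq_some_iff.mp hb' with ⟨s2, _, rfl⟩
    show ((r : Int) * (days.length : Int) + q.1) < ((r : Int) * (days.length : Int) + q'.1)
    linarith
  · rw [List.pairwise_map]
    refine List.Pairwise.imp ?_ (List.pairwise_lt_range (n := w))
    intro r1 r2 hr x hx y hy
    rcases List.mem_filterMap.mp hx with ⟨q, hq, hfx⟩
    rcases List.mem_filterMap.mp hy with ⟨q', hq', hfy⟩
    rcases Option.map_eq_some_iff.mp hfx with ⟨s1, _, rfl⟩
    rcases Option.map_eq_some_iff.mp hfy with ⟨s2, _, rfl⟩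
    rcases (PySem.List.mem_enumerate_iff _ _ _).mp hq with ⟨k, hk, rfl⟩
    rcases (PySem.List.mem_enumerate_iff _ _ _).mp hq' with ⟨k', hk', rfl⟩
    simp only [zero_add]
    have hq1 : (k : Int) < (days.length : Int) := by exact_mod_cast hk
    have hq0 : (0 : Int) ≤ (k' : Int) := by positivity
    have hstep : ((r1 : Int) + 1) * (days.length : Int) ≤ (r2 : Int) * (days.length : Int) := by
      apply mul_le_mul_of_nonneg_right
      · exact_mod_cast hr
      · positivity
    nlinarith [hq1, hq0, hstep]

-- dropping the ranks from the decorated transpose gives A's flattened transpose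
theorem pvDecorated_map_snd (cand : List (String × Int)) (days : List String) (w : Nat)
    (byday : PySem.Dict String (List (String × Int)))
    (hbd : ∀ d ∈ days, byday.getD d [] = pvG cand d) :
    (pvDecorated cand days w).map (fun t => t.2) = pvFlatK byday days w := by
  rw [pvDecorated, List.map_flatMap, pvFlatK]
  apply List.flatMap_congr
  intro r _
  rw [pvTRow, List.map_filterMap, pvRow, List.filterMap_map]
  have e1 : ∀ q ∈ PySem.List.enumerate days 0,
      Option.map (fun t : Int × (String × Int) => t.2)
        (Option.map (fun slot => ((r : Int) * (days.length : Int) + q.1, slot))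
          ((pvG cand q.2)[r]?)) = (pvG cand q.2)[r]? := by
    intro q _
    cases h : (pvG cand q.2)[r]? <;> simp [h]
  rw [List.filterMap_congr e1]
  have e2 : days.filterMap ((fun g => g[r]?) ∘ (fun d => byday.getD d [])) =
      days.filterMap (fun d => (pvG cand d)[r]?) := by
    apply List.filterMap_congr
    intro d hd
    simp [Function.comp, hbd d hd]
  rw [e2]
  conv_rhs => rw [← PySem.List.map_snd_enumerate days 0, List.filterMap_map]
  rfl

-- ===== VERDICT (by name: the statement is the Claim_ definition above) =====
theorem spread_slots_py_spec : Claim_equal_spread_slots_py := by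
  unfold Claim_equal_spread_slots_py
  intro cand needed days _ hPre
  unfold Spec_spread_slots_py spread_slots_py spread_slots_py_alt
  by_cases hle : (cand.length : Int) ≤ needed
  · simp [hle]
  · simp only [if_neg hle]
    rcases hPre with hnil | ⟨h0, hcase⟩
    · -- no candidates (and needed < 0, else the first branch fired): both return []
      subst hnil
      simp only [List.length_nil, Int.natCast_zero, not_le] at hle
      rw [show needed.toNat + 1 = 0 + 1 by omega]
      simp only [pvAOuter]
      rw [if_neg (by simp; omega)]
      rw [show (pvBFold days []).2 = ([] : List (Int × (String × Int))) from rfl]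
      rw [show PySem.List.sorted ([] : List (Int × (String × Int))) (fun t => t.1) =
        ([] : List (Int × (String × Int))) from rfl]
      simp [PySem.List.slice]
    · rcases hcase with h | ⟨hnod, hmem⟩
      · omega
      · -- the main case: 0 ≤ needed < len candidates, distinct days covering all slots
        have hgt : needed < (cand.length : Int) := by omega
        set byday := pvByDay cand days with hbyday
        set w := ((days.map (fun d => byday.getD d [])).map List.length).foldl max 0 with hw
        have hGd : ∀ d ∈ days, byday.getD d [] = pvG cand d := by
          intro d hd
          rw [hbyday, pvGetD_byDay cand days d hd]
          rfl
        have hbound : ∀ g ∈ days.map (fun d => byday.getD d []), g.length ≤ w := by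
          intro g hg
          exact (PySem.List.le_foldl_max _ 0).2 g.length (List.mem_map_of_mem hg)
        have hbnd : ∀ d ∈ days, (pvG cand d).length ≤ w := by
          intro d hd
          rw [← hGd d hd]
          exact hbound _ (List.mem_map_of_mem hd)
        have hflatlen : (pvFlatK byday days w).length = cand.length := by
          rw [pvFlat_length byday days w hbound]
          have heq : days.map (fun d => (byday.getD d []).length) =
              days.map (fun d => (cand.filter (fun p => p.1 = d)).length) := by
            apply List.map_congr_left
            intro d hd
            rw [hbyday, pvGetD_byDay cand days d hd]
          rw [heq, pvSum_filter_len days cand hnod hmem]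
        have hflat : needed.toNat < (pvFlatK byday days w).length := by
          rw [hflatlen]; omega
        have hinv0 : ∀ d ∈ days,
            (days.foldl (fun m d => m.insert d (0 : Nat)) PySem.Dict.empty).getD d 0 =
              min 0 (byday.getD d []).length := by
          intro d hd
          rw [pvGetD_foldl_insert_mem _ _ _ _ _ hd, Nat.zero_min]
        have hmain := pvAOuter_spec byday needed days w hnod h0 hw hflat (needed.toNat + 1) 0
          (days.foldl (fun m d => m.insert d (0 : Nat)) PySem.Dict.empty)
          (by omega) hinv0 (by simp [pvFlatK]) (by omega)
        rw [show pvFlatK byday days 0 = [] from rfl] at hmain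
        -- B's side: sorted keyed = the decorated transpose
        have hperm1 := pvKeyed_perm_grouped days hnod cand hmem
        have hperm2 := pvGrouped_perm_decorated cand days w hbnd
        have hsorted : PySem.List.sorted (pvBFold days cand).2 (fun t => t.1) =
            pvDecorated cand days w :=
          PySem.List.sorted_eq_of_perm_of_pairwise_lt _ _ _
            (hperm2.trans hperm1.symm) (pvDecorated_pairwise cand days w)
        rw [hmain, hsorted, PySem.List.slice_to _ h0, List.map_take,
          pvDecorated_map_snd cand days w byday hGd]
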